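-- pv_equiv track=rewrite | github.com/ROCm/Tensile | tuning/automation/GenerateTuningConfigurations.py | determineGSU
-- ===== SOURCE A (Python) =====
-- import math
--
-- def determineGSU(sizeList, mfma):
--     gsuVals = [1]
--     gsuSizes = list()
--     units = 60 if mfma == "false" else 120
--     for size in sizeList:
--         m = size[0]
--         n = size[1]
--         k = size[3]
--         tiles = [128, 128]
--         newGsu = 1
--         if (m <= 512 or n <= 512) and (k >= 5*m or k >= 5*n):
--             gsuSizes.append(size)
--             while tiles[1] >= 32:
--                 val1 = math.ceil(m/tiles[0]) if math.ceil(m/tiles[0]) >= 1 else 1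
--                 val2 = math.ceil(n/tiles[1]) if math.ceil(n/tiles[1]) >= 1 else 1
--                 totalUnits = val1*val2
--                 if totalUnits >= units:
--                     if newGsu not in gsuVals:
--                         gsuVals.append(newGsu)
--                     break
--                 else:
--                     if tiles[0] == tiles[1]:
--                         tiles[1] = tiles[1] / 2
--                     else:
--                         tiles[0] = tiles[0] / 2
--                     if tiles[1] != 16:
--                         newGsu = newGsu * 2
--                     else:
--                         if newGsu not in gsuVals:
--                             gsuVals.append(newGsu)
--         if k > 100*m and k > 100*n:
--             if 32 not in gsuVals:
--                 gsuVals.append(32)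
--     gsuVals.sort()
--     return [gsuSizes,gsuVals]
-- ===== SOURCE B (Python) =====
-- # Value-major rewrite: instead of A's stateful tile-halving loop feeding an
-- # append-if-absent list that is sorted at the end, B counts failing schedule
-- # steps arithmetically (gsu = 2**min(fails,4), valid since the step products are
-- # monotone) and builds the result directly as the ordered subsequence of
-- # (1,2,4,8,16,32) whose members occur; no set, no sort, no early-exit scan.
--
-- def determineGSU(sizeList, mfma):
--     units = 60 if mfma == "false" else 120
--     gsuSizes = [s for s in sizeList
--                 if (s[0] <= 512 or s[1] <= 512) and (s[3] >= 5 * s[0] or s[3] >= 5 * s[1])]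
--
--     def gsu(s):
--         m, n = s[0], s[1]
--         fails = sum(1 for t0, t1 in ((128, 128), (128, 64), (64, 64), (64, 32), (32, 32))
--                     if max(-(-m // t0), 1) * max(-(-n // t1), 1) < units)
--         return 2 ** min(fails, 4)
--
--     def keep(v):
--         if v == 1:
--             return True
--         if v == 32:
--             return any(s[3] > 100 * s[0] and s[3] > 100 * s[1] for s in sizeList)
--         return any(gsu(s) == v for s in gsuSizes)
--
--     return [gsuSizes, [v for v in (1, 2, 4, 8, 16, 32) if keep(v)]]
-- ===== Notes on version B (the rewrite author's own statement) =====
-- stated objective: alternative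
-- what changed: Replaces A's stateful tile-halving while-loop with early exit and append-if-absent list plus final sort by an arithmetic count of failing schedule steps (gsu = 2**min(fails,4), correct because the step products are monotone) and builds the result value-major: the ordered candidate list (1,2,4,8,16,32) filtered by an occurrence test, with no set, no dedup and no sort.
import Mathlib
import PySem

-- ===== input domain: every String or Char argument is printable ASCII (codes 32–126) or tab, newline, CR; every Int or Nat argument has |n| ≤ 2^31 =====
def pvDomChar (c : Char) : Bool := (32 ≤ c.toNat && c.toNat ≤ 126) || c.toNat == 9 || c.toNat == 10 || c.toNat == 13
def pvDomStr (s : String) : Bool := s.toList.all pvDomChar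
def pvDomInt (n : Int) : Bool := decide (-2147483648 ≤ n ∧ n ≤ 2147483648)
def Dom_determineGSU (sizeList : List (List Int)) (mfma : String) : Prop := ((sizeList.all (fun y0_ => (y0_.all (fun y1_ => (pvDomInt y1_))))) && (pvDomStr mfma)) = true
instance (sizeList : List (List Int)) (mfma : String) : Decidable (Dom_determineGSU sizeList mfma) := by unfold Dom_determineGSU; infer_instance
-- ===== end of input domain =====

-- B replaces A's stateful tile-halving loop + append-if-absent + final sort by an
-- arithmetic count of failing schedule steps and a value-major ordered filter
-- over the candidates (1,2,4,8,16,32) (objective: alternative).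

-- ===== PORT A =====

-- math.ceil(m / t) with Python float division; exact as integer ceiling division here
-- because t is a power of two ≤ 128 and |m| ≤ 2^31, so m/t is an exact float.
def pyCeilDiv (a b : Int) : Int := -(PySem.Int.floordiv (-a) b)

-- the `while tiles[1] >= 32` loop of A; fuel only makes the recursion total (the loop
-- runs at most 5 iterations from tiles = [128,128]).  tiles[i]/2 is float true division
-- in A, exact on these powers of two, ported as floordiv.
def gsuLoop (fuel : Nat) (t0 t1 newGsu m n units : Int) (gsuVals : List Int) : List Int :=
  match fuel with
  | 0 => gsuVals
  | fuel + 1 =>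
    if t1 ≥ 32 then
      let c0 := pyCeilDiv m t0
      let val1 := if c0 ≥ 1 then c0 else 1
      let c1 := pyCeilDiv n t1
      let val2 := if c1 ≥ 1 then c1 else 1
      if val1 * val2 ≥ units then
        if gsuVals.contains newGsu then gsuVals else gsuVals ++ [newGsu]
      else
        let t0' := if t0 == t1 then t0 else PySem.Int.floordiv t0 2
        let t1' := if t0 == t1 then PySem.Int.floordiv t1 2 else t1
        if t1' ≠ 16 then
          gsuLoop fuel t0' t1' (newGsu * 2) m n units gsuVals
        else
          gsuLoop fuel t0' t1' newGsu m n units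
            (if gsuVals.contains newGsu then gsuVals else gsuVals ++ [newGsu])
    else gsuVals

def determineGSU (sizeList : List (List Int)) (mfma : String) : List (List Int) × List Int :=
  let units : Int := if mfma == "false" then 60 else 120
  let st := sizeList.foldl (fun (st : List (List Int) × List Int) size =>
    let m := PySem.List.pyGetD size 0 0
    let n := PySem.List.pyGetD size 1 0
    let k := PySem.List.pyGetD size 3 0
    let st :=
      if (m ≤ 512 ∨ n ≤ 512) ∧ (k ≥ 5 * m ∨ k ≥ 5 * n) then
        (st.1 ++ [size], gsuLoop 8 128 128 1 m n units st.2)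
      else st
    if k > 100 * m ∧ k > 100 * n then
      (st.1, if st.2.contains 32 then st.2 else st.2 ++ [32])
    else st) ([], [1])
  (st.1, PySem.List.sorted st.2 (fun x => x) false)

-- ===== PORT B =====

def gsuSteps : List (Int × Int) := [(128, 128), (128, 64), (64, 64), (64, 32), (32, 32)]

-- -(-m // t) is exact integer ceiling division, ported as pyCeilDiv
def gsuB (m n units : Int) : Int :=
  2 ^ (min ((gsuSteps.filter (fun p =>
    decide (max (pyCeilDiv m p.1) 1 * max (pyCeilDiv n p.2) 1 < units))).length) 4)

def qualB (s : List Int) : Bool :=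
  decide ((PySem.List.pyGetD s 0 0 ≤ 512 ∨ PySem.List.pyGetD s 1 0 ≤ 512) ∧
    (PySem.List.pyGetD s 3 0 ≥ 5 * PySem.List.pyGetD s 0 0 ∨
     PySem.List.pyGetD s 3 0 ≥ 5 * PySem.List.pyGetD s 1 0))

def bigK (s : List Int) : Bool :=
  decide (PySem.List.pyGetD s 3 0 > 100 * PySem.List.pyGetD s 0 0 ∧
          PySem.List.pyGetD s 3 0 > 100 * PySem.List.pyGetD s 1 0)

def keepB (sizeList gsuSizes : List (List Int)) (units v : Int) : Bool :=
  if v == 1 then true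
  else if v == 32 then sizeList.any bigK
  else gsuSizes.any (fun s =>
    gsuB (PySem.List.pyGetD s 0 0) (PySem.List.pyGetD s 1 0) units == v)

def determineGSU_alt (sizeList : List (List Int)) (mfma : String) : List (List Int) × List Int :=
  let units : Int := if mfma == "false" then 60 else 120
  let gsuSizes := sizeList.filter qualB
  (gsuSizes, ([1, 2, 4, 8, 16, 32] : List Int).filter (keepB sizeList gsuSizes units))

-- ===== PRECONDITION & SPEC =====
-- Pre_ excludes exactly the inputs where A raises IndexError: a size row shorter than 4.
def Pre_determineGSU (sizeList : List (List Int)) (_mfma : String) : Prop :=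
  ∀ s ∈ sizeList, 4 ≤ s.length
instance (sizeList : List (List Int)) (mfma : String) : Decidable (Pre_determineGSU sizeList mfma) := by
  unfold Pre_determineGSU; infer_instance

def pvWitness_determineGSU : List (List Int) × String := ([[64, 64, 1, 640]], "false")

def Spec_determineGSU (sizeList : List (List Int)) (mfma : String) (out : List (List Int) × List Int) : Prop := out = determineGSU_alt sizeList mfma
instance (sizeList : List (List Int)) (mfma : String) (out : List (List Int) × List Int) : Decidable (Spec_determineGSU sizeList mfma out) := by unfold Spec_determineGSU; infer_instance

-- ===== CLAIM (what is proved, stated in full; the proofs are below) =====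
def Claim_equal_determineGSU : Prop := ∀ (sizeList : List (List Int)) (mfma : String), Dom_determineGSU sizeList mfma → Pre_determineGSU sizeList mfma → Spec_determineGSU sizeList mfma (determineGSU sizeList mfma)

-- ===== LEMMAS AND PROOFS =====

theorem if_ge_eq_max (c : Int) : (if c ≥ 1 then c else 1) = max c 1 := by
  split_ifs with h <;> omega

-- halving the tile cannot decrease the (clamped) ceiling-division factor
theorem ceil_mono_128_64 (x : Int) : max (pyCeilDiv x 128) 1 ≤ max (pyCeilDiv x 64) 1 := by
  unfold pyCeilDiv
  rw [PySem.Int.floordiv_eq_ediv_of_pos (by norm_num), PySem.Int.floordiv_eq_ediv_of_pos (by norm_num)]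
  omega

theorem ceil_mono_64_32 (x : Int) : max (pyCeilDiv x 64) 1 ≤ max (pyCeilDiv x 32) 1 := by
  unfold pyCeilDiv
  rw [PySem.Int.floordiv_eq_ediv_of_pos (by norm_num), PySem.Int.floordiv_eq_ediv_of_pos (by norm_num)]
  omega

-- a product of factors ≥ 1 is monotone in each factor
theorem prod_mono (u a a' b b' : Int) (ha : a ≤ a') (hb : b ≤ b')
    (ha1 : 1 ≤ a) (hb1 : 1 ≤ b) (h : a * b ≥ u) : a' * b' ≥ u := by nlinarith

-- A's while loop, started at (128,128,1), performs exactly one append-if-absent of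
-- B's arithmetically computed gsu value.
set_option maxHeartbeats 1600000 in
theorem gsuLoop_eq (m n units : Int) (gv : List Int) :
    gsuLoop 8 128 128 1 m n units gv =
      (if gv.contains (gsuB m n units) then gv else gv ++ [gsuB m n units]) := by
  have mono12 := prod_mono units _ _ _ _ (le_refl (max (pyCeilDiv m 128) 1))
    (ceil_mono_128_64 n) (le_max_right _ _) (le_max_right _ _)
  have mono23 := prod_mono units _ _ _ _ (ceil_mono_128_64 m)
    (le_refl (max (pyCeilDiv n 64) 1)) (le_max_right _ _) (le_max_right _ _)
  have mono34 := prod_mono units _ _ _ _ (le_refl (max (pyCeilDiv m 64) 1))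
    (ceil_mono_64_32 n) (le_max_right _ _) (le_max_right _ _)
  have mono45 := prod_mono units _ _ _ _ (ceil_mono_64_32 m)
    (le_refl (max (pyCeilDiv n 32) 1)) (le_max_right _ _) (le_max_right _ _)
  by_cases h1 : max (pyCeilDiv m 128) 1 * max (pyCeilDiv n 128) 1 ≥ units
  · have h2 := mono12 h1; have h3 := mono23 h2; have h4 := mono34 h3; have h5 := mono45 h4
    simp [gsuLoop, gsuB, gsuSteps, if_ge_eq_max, h1,
      not_lt.mpr h1, not_lt.mpr h2, not_lt.mpr h3, not_lt.mpr h4, not_lt.mpr h5]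
  · by_cases h2 : max (pyCeilDiv m 128) 1 * max (pyCeilDiv n 64) 1 ≥ units
    · have h3 := mono23 h2; have h4 := mono34 h3; have h5 := mono45 h4
      simp [gsuLoop, gsuB, gsuSteps, if_ge_eq_max, h1, h2, lt_of_not_ge h1,
        not_lt.mpr h2, not_lt.mpr h3, not_lt.mpr h4, not_lt.mpr h5,
        PySem.Int.floordiv, Int.fdiv]
    · by_cases h3 : max (pyCeilDiv m 64) 1 * max (pyCeilDiv n 64) 1 ≥ units
      · have h4 := mono34 h3; have h5 := mono45 h4
        simp [gsuLoop, gsuB, gsuSteps, if_ge_eq_max, h1, h2, h3,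
          lt_of_not_ge h1, lt_of_not_ge h2,
          not_lt.mpr h3, not_lt.mpr h4, not_lt.mpr h5,
          PySem.Int.floordiv, Int.fdiv]
      · by_cases h4 : max (pyCeilDiv m 64) 1 * max (pyCeilDiv n 32) 1 ≥ units
        · have h5 := mono45 h4
          simp [gsuLoop, gsuB, gsuSteps, if_ge_eq_max, h1, h2, h3, h4,
            lt_of_not_ge h1, lt_of_not_ge h2, lt_of_not_ge h3,
            not_lt.mpr h4, not_lt.mpr h5,
            PySem.Int.floordiv, Int.fdiv]
        · by_cases h5 : max (pyCeilDiv m 32) 1 * max (pyCeilDiv n 32) 1 ≥ units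
          · simp [gsuLoop, gsuB, gsuSteps, if_ge_eq_max, h1, h2, h3, h4, h5,
              lt_of_not_ge h1, lt_of_not_ge h2, lt_of_not_ge h3, lt_of_not_ge h4,
              not_lt.mpr h5, PySem.Int.floordiv, Int.fdiv]
          · simp [gsuLoop, gsuB, gsuSteps, if_ge_eq_max, h1, h2, h3, h4, h5,
              lt_of_not_ge h1, lt_of_not_ge h2, lt_of_not_ge h3, lt_of_not_ge h4,
              lt_of_not_ge h5, PySem.Int.floordiv, Int.fdiv]

-- the per-prefix sequence of values A feeds into append-if-absent
def seqA (units : Int) (l : List (List Int)) : List Int :=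
  l.flatMap (fun s =>
    (if qualB s then [gsuB (PySem.List.pyGetD s 0 0) (PySem.List.pyGetD s 1 0) units] else []) ++
    (if bigK s then [32] else []))

theorem foldA_char (units : Int) (l : List (List Int)) (p : List (List Int) × List Int) :
    l.foldl (fun (st : List (List Int) × List Int) size =>
      let m := PySem.List.pyGetD size 0 0
      let n := PySem.List.pyGetD size 1 0
      let k := PySem.List.pyGetD size 3 0
      let st :=
        if (m ≤ 512 ∨ n ≤ 512) ∧ (k ≥ 5 * m ∨ k ≥ 5 * n) then
          (st.1 ++ [size], gsuLoop 8 128 128 1 m n units st.2)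
        else st
      if k > 100 * m ∧ k > 100 * n then
        (st.1, if st.2.contains 32 then st.2 else st.2 ++ [32])
      else st) p
    = (p.1 ++ l.filter qualB, PySem.Set.update p.2 (seqA units l)) := by
  induction l generalizing p with
  | nil => simp [seqA, PySem.Set.update]
  | cons s l ih =>
    rw [List.foldl_cons, ih]
    by_cases hq : ((PySem.List.pyGetD s 0 0 ≤ 512 ∨ PySem.List.pyGetD s 1 0 ≤ 512) ∧
        (PySem.List.pyGetD s 3 0 ≥ 5 * PySem.List.pyGetD s 0 0 ∨
         PySem.List.pyGetD s 3 0 ≥ 5 * PySem.List.pyGetD s 1 0)) <;>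
    by_cases hb : (PySem.List.pyGetD s 3 0 > 100 * PySem.List.pyGetD s 0 0 ∧
        PySem.List.pyGetD s 3 0 > 100 * PySem.List.pyGetD s 1 0) <;>
    simp [seqA, qualB, bigK, hq, hb, PySem.Set.update, gsuLoop_eq, PySem.Set.add]

theorem mem_seqA (units x : Int) (l : List (List Int)) :
    x ∈ seqA units l ↔
      (∃ s ∈ l, qualB s ∧
        x = gsuB (PySem.List.pyGetD s 0 0) (PySem.List.pyGetD s 1 0) units) ∨
      (x = 32 ∧ l.any bigK) := by
  simp only [seqA, List.mem_flatMap, List.mem_append, List.any_eq_true]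
  constructor
  · rintro ⟨s, hs, h | h⟩
    · by_cases hq : qualB s
      · simp [hq] at h; exact Or.inl ⟨s, hs, hq, h⟩
      · simp [hq] at h
    · by_cases hbb : bigK s
      · simp [hbb] at h; exact Or.inr ⟨h, s, hs, hbb⟩
      · simp [hbb] at h
  · rintro (⟨s, hs, hq, h⟩ | ⟨h, s, hs, hbb⟩)
    · exact ⟨s, hs, Or.inl (by simp [hq, h])⟩
    · exact ⟨s, hs, Or.inr (by simp [hbb, h])⟩

-- B's gsu value is one of the candidates 1,2,4,8,16
theorem gsuB_mem (m n units : Int) : gsuB m n units ∈ ([1, 2, 4, 8, 16] : List Int) := by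
  unfold gsuB
  set c := (gsuSteps.filter (fun p =>
    decide (max (pyCeilDiv m p.1) 1 * max (pyCeilDiv n p.2) 1 < units))).length with hc
  have hle : min c 4 ≤ 4 := min_le_right _ _
  interval_cases h : min c 4 <;> decide

-- the value set A accumulates, as a predicate
def occursA (units : Int) (l : List (List Int)) (x : Int) : Prop :=
  x = 1 ∨
  (∃ s ∈ l, qualB s = true ∧
    gsuB (PySem.List.pyGetD s 0 0) (PySem.List.pyGetD s 1 0) units = x) ∨
  (x = 32 ∧ l.any bigK = true)

theorem mem_update_iff_occursA (units x : Int) (l : List (List Int)) :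
    x ∈ PySem.Set.update ([1] : List Int) (seqA units l) ↔ occursA units l x := by
  unfold occursA
  rw [PySem.Set.mem_update, mem_seqA, List.mem_singleton]
  constructor <;> rintro (h | ⟨s, hs, hq, hg⟩ | h)
  · exact Or.inl h
  · exact Or.inr (Or.inl ⟨s, hs, hq, hg.symm⟩)
  · exact Or.inr (Or.inr h)
  · exact Or.inl h
  · exact Or.inr (Or.inl ⟨s, hs, hq, hg.symm⟩)
  · exact Or.inr (Or.inr h)

theorem mem_filter_keepB_iff_occursA (units x : Int) (l : List (List Int)) :
    x ∈ ([1, 2, 4, 8, 16, 32] : List Int).filter (keepB l (l.filter qualB) units) ↔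
      occursA units l x := by
  rw [List.mem_filter]
  constructor
  · rintro ⟨hmem, hkeep⟩
    simp only [List.mem_cons, List.not_mem_nil, or_false] at hmem
    rcases hmem with rfl | rfl | rfl | rfl | rfl | rfl
    · exact Or.inl rfl
    · simp only [keepB] at hkeep; norm_num at hkeep
      exact Or.inr (Or.inl hkeep)
    · simp only [keepB] at hkeep; norm_num at hkeep
      exact Or.inr (Or.inl hkeep)
    · simp only [keepB] at hkeep; norm_num at hkeep
      exact Or.inr (Or.inl hkeep)
    · simp only [keepB] at hkeep; norm_num at hkeep
      exact Or.inr (Or.inl hkeep)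
    · simp only [keepB] at hkeep; norm_num at hkeep
      exact Or.inr (Or.inr ⟨rfl, by simpa [List.any_eq_true] using hkeep⟩)
  · rintro (rfl | ⟨s, hs, hq, hg⟩ | ⟨rfl, hb⟩)
    · exact ⟨by decide, by simp [keepB]⟩
    · have hmem := gsuB_mem (PySem.List.pyGetD s 0 0) (PySem.List.pyGetD s 1 0) units
      rw [hg] at hmem
      simp only [List.mem_cons, List.not_mem_nil, or_false] at hmem
      rcases hmem with rfl | rfl | rfl | rfl | rfl <;>
        (refine ⟨by decide, ?_⟩; simp only [keepB]; norm_num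
         try exact ⟨s, hs, hq, hg⟩)
    · refine ⟨by decide, ?_⟩
      simp only [keepB]; norm_num
      simpa [List.any_eq_true] using hb

-- the final list B builds is a strictly increasing enumeration of A's value set
theorem vals_eq (units : Int) (l : List (List Int)) :
    PySem.List.sorted (PySem.Set.update ([1] : List Int) (seqA units l)) (fun x => x) false
    = ([1, 2, 4, 8, 16, 32] : List Int).filter (keepB l (l.filter qualB) units) := by
  apply PySem.List.sorted_eq_of_perm_of_pairwise_lt
  · have h1 : (PySem.Set.update ([1] : List Int) (seqA units l)).Nodup :=
      PySem.Set.nodup_update _ _ (by simp)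
    have h2 : (([1, 2, 4, 8, 16, 32] : List Int).filter (keepB l (l.filter qualB) units)).Nodup :=
      List.Nodup.filter _ (by decide)
    rw [List.perm_ext_iff_of_nodup h2 h1]
    intro x
    rw [mem_update_iff_occursA, mem_filter_keepB_iff_occursA]
  · exact List.Pairwise.sublist List.filter_sublist (by decide)

-- ===== VERDICT (by name: the statement is the Claim_ definition above) =====
theorem determineGSU_spec : Claim_equal_determineGSU := by
  intro sizeList mfma _ _
  unfold Spec_determineGSU determineGSU determineGSU_alt
  simp only [foldA_char, List.nil_append]
  exact congrArg _ (vals_eq _ _)
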